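-- pv_equiv track=rewrite | github.com/maghams62/auto_mac | src/agent/evidence_retrievers.py | _extract_component_token
-- ===== SOURCE A (Python) =====
-- from typing import Any, Dict, List, Optional, Tuple
--
-- def _extract_component_token(query: str) -> Optional[str]:
--     if not query:
--         return None
--     for token in query.replace(",", " ").split():
--         token = token.strip()
--         if token.startswith("comp:"):
--             return token
--     return None
-- ===== SOURCE B (Python) =====
-- from typing import Optional
--
--
-- def _extract_component_token(query: str) -> Optional[str]:
--     # Single left-to-right scan: skip delimiters (whitespace or comma), read the
--     # next token, return it if it starts with "comp:", else continue.
--     i, n = 0, len(query)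
--     while i < n:
--         c = query[i]
--         if c.isspace() or c == ',':
--             i += 1
--             continue
--         j = i
--         while j < n and not (query[j].isspace() or query[j] == ','):
--             j += 1
--         token = query[i:j]
--         if token.startswith("comp:"):
--             return token
--         i = j
--     return None
-- ===== Notes on version B (the rewrite author's own statement) =====
-- stated objective: alternative
-- what changed: Replaces A's replace-comma-then-split-then-loop-over-tokens pipeline (which materialises the whole token list) with a single index-based character scan that skips delimiters and examines one token at a time, stopping at the first comp:-prefixed token.
import Mathlib
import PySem

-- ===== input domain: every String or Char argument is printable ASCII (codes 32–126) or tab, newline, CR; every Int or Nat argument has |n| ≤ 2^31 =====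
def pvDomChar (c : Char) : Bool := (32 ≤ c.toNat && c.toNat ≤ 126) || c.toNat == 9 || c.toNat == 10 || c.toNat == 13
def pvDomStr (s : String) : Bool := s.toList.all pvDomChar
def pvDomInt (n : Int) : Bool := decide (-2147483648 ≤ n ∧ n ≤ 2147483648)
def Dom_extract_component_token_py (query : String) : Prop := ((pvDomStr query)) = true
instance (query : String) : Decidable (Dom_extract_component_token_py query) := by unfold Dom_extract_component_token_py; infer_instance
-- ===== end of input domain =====

-- B replaces A's replace/split/token-loop pipeline with a single character scan; alternative decomposition, same cost.

-- ===== PORT A =====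
-- the 'for token in …' loop over the token list
def pvALoop : List String → Option String
  | [] => none
  | t :: ts =>
    let t' := PySem.Str.strip t
    if PySem.Str.startswith t' "comp:" then some t' else pvALoop ts

def extract_component_token_py (query : String) : Option String :=
  if query = "" then none
  else pvALoop (PySem.Str.split₀ (PySem.Str.replace query "," " "))

-- ===== PORT B =====
-- 'c.isspace() or c == ","'
def pvDelim (c : Char) : Bool := PySem.Chars.isspace c || c == ','

-- Source B's outer while loop: skip a delimiter, or read the maximal token
-- (inner while = takeWhile, advancing i to j = dropWhile) and test it
def pvScan : List Char → Option (List Char)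
  | [] => none
  | c :: rest =>
    if pvDelim c then pvScan rest
    else
      let token := c :: rest.takeWhile (fun d => !pvDelim d)
      if PySem.Chars.startswith token ['c','o','m','p',':'] then some token
      else pvScan (rest.dropWhile (fun d => !pvDelim d))
termination_by l => l.length
decreasing_by
  · simp
  · simpa using Nat.lt_succ_of_le (List.length_dropWhile_le _ rest)

def extract_component_token_py_alt (query : String) : Option String :=
  (pvScan query.toList).map String.ofList

-- ===== PRECONDITION & SPEC =====
def Spec_extract_component_token_py (query : String) (out : Option String) : Prop := out = extract_component_token_py_alt query
instance (query : String) (out : Option String) : Decidable (Spec_extract_component_token_py query out) := by unfold Spec_extract_component_token_py; infer_instance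

-- ===== CLAIM (what is proved, stated in full; the proofs are below) =====
def Claim_equal_extract_component_token_py : Prop := ∀ (query : String), Dom_extract_component_token_py query → Spec_extract_component_token_py query (extract_component_token_py query)

-- ===== LEMMAS AND PROOFS =====

-- replacing "," by " " maps each character
def pvRepl (c : Char) : Char := if c = ',' then ' ' else c

theorem pv_replace_go (l : List Char) : ∀ (fuel : Nat) (acc : List Char), l.length ≤ fuel →
    PySem.Chars.replace.go [','] [' '] fuel l acc = acc.reverse ++ l.map pvRepl := by
  induction l with
  | nil =>
    intro fuel acc _
    cases fuel <;> simp [PySem.Chars.replace.go]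
  | cons c t ih =>
    intro fuel acc h
    cases fuel with
    | zero => simp at h
    | succ f =>
      by_cases hc : c = ','
      · subst hc
        rw [PySem.Chars.replace.go]
        simp only [List.isPrefixOf, beq_self_eq_true, if_true, Bool.and_true,
          List.length_cons, List.length_nil, List.drop_succ_cons, List.drop_zero]
        rw [ih f _ (by simpa using h)]
        simp [pvRepl]
      · rw [PySem.Chars.replace.go]
        have : [','].isPrefixOf (c :: t) = false := by
          simp [List.isPrefixOf]; exact fun h' => (hc h'.symm).elim
        rw [this]
        simp only [if_neg Bool.false_ne_true]
        rw [ih f _ (by simpa using h)]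
        simp [pvRepl, hc]

theorem pv_replace_map (l : List Char) :
    PySem.Chars.replace l [','] [' '] = l.map pvRepl := by
  simp [PySem.Chars.replace, pv_replace_go l l.length [] le_rfl]

theorem pv_isspace_repl (c : Char) : PySem.Chars.isspace (pvRepl c) = pvDelim c := by
  by_cases hc : c = ','
  · subst hc; simp [pvRepl, pvDelim]; decide
  · have hb : (c == ',') = false := by simp [hc]
    simp [pvRepl, hc, pvDelim, hb]

-- reference tokenizer over the ORIGINAL characters with delimiter pvDelim
def pvTok : List Char → List Char → List (List Char)
  | [], cur => if cur.isEmpty then [] else [cur.reverse]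
  | c :: rest, cur =>
    if pvDelim c then
      (if cur.isEmpty then pvTok rest [] else cur.reverse :: pvTok rest [])
    else pvTok rest (c :: cur)

theorem pv_split₀_go (l : List Char) : ∀ (cur : List Char) (acc : List (List Char)),
    PySem.Chars.split₀.go (l.map pvRepl) cur acc = acc.reverse ++ pvTok l cur := by
  induction l with
  | nil =>
    intro cur acc
    simp only [List.map_nil]
    rw [PySem.Chars.split₀.go, pvTok]
    by_cases h : cur.isEmpty <;> simp [h]
  | cons c rest ih =>
    intro cur acc
    simp only [List.map_cons]
    rw [PySem.Chars.split₀.go, pvTok, pv_isspace_repl]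
    by_cases hd : pvDelim c
    · by_cases hcur : cur.isEmpty <;> simp [hd, hcur, ih]
    · have hrc : pvRepl c = c := by
        have : c ≠ ',' := by intro h; apply hd; simp [pvDelim, h]
        simp [pvRepl, this]
      simp [hd, hrc, ih]

theorem pv_split₀_map (l : List Char) :
    PySem.Chars.split₀ (l.map pvRepl) = pvTok l [] := by
  simpa using pv_split₀_go l [] []

-- loop A at the char-list level
def pvLoopC : List (List Char) → Option (List Char)
  | [] => none
  | t :: ts =>
    let t' := PySem.Chars.strip t
    if PySem.Chars.startswith t' ['c','o','m','p',':'] then some t' else pvLoopC ts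

theorem pv_aloop_eq (ts : List (List Char)) :
    pvALoop (ts.map String.ofList) = (pvLoopC ts).map String.ofList := by
  induction ts with
  | nil => simp [pvALoop, pvLoopC]
  | cons t ts ih =>
    have hstrip : PySem.Str.strip (String.ofList t) = String.ofList (PySem.Chars.strip t) := by
      rw [← String.toList_inj]; simp [PySem.Str.toList_strip]
    have hsw : PySem.Str.startswith (String.ofList (PySem.Chars.strip t)) "comp:"
        = PySem.Chars.startswith (PySem.Chars.strip t) ['c','o','m','p',':'] := by
      have hc : ("comp:").toList = ['c','o','m','p',':'] := by decide
      rw [PySem.Str.startswith_eq, String.toList_ofList, hc]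
    simp only [pvALoop, pvLoopC, List.map_cons, hstrip, hsw]
    by_cases h : PySem.Chars.startswith (PySem.Chars.strip t) ['c','o','m','p',':'] <;>
      simp [h, ih]

theorem pv_dropWhile_all_false {p : Char → Bool} {l : List Char}
    (h : ∀ c ∈ l, p c = false) : l.dropWhile p = l := by
  cases l with
  | nil => rfl
  | cons c t => rw [List.dropWhile_cons, if_neg (by simp [h c (by simp)])]

theorem pv_strip_id {t : List Char} (h : ∀ c ∈ t, PySem.Chars.isspace c = false) :
    PySem.Chars.strip t = t := by
  unfold PySem.Chars.strip PySem.Chars.lstrip PySem.Chars.rstrip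
  rw [pv_dropWhile_all_false h, pv_dropWhile_all_false (by intro c hc; exact h c (List.mem_reverse.mp hc)),
    List.reverse_reverse]

theorem pv_tok_split (rest : List Char) : ∀ (cur : List Char), cur ≠ [] →
    pvTok rest cur = (cur.reverse ++ rest.takeWhile (fun d => !pvDelim d))
      :: pvTok (rest.dropWhile (fun d => !pvDelim d)) [] := by
  induction rest with
  | nil =>
    intro cur hc
    simp [pvTok, List.isEmpty_iff, hc]
  | cons c r ih =>
    intro cur hc
    by_cases hd : pvDelim c
    · rw [pvTok]
      simp [hd, List.isEmpty_iff, hc, pvTok]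
    · rw [pvTok]
      simp only [hd, Bool.false_eq_true, if_false, List.takeWhile_cons, List.dropWhile_cons,
        Bool.not_eq_true']
      rw [ih (c :: cur) (by simp)]
      simp

theorem pv_main (l : List Char) : pvLoopC (pvTok l []) = pvScan l := by
  induction l using pvScan.induct with
  | case1 => simp [pvTok, pvLoopC, pvScan]
  | case2 c rest hd ih =>
    rw [pvScan, if_pos hd, ← ih, pvTok]
    simp [hd]
  | case3 c rest hd token hsw =>
    rw [pvScan, if_neg hd]
    rw [pvTok, if_neg hd, pv_tok_split rest [c] (by simp)]
    have htok : ∀ x ∈ c :: rest.takeWhile (fun d => !pvDelim d), PySem.Chars.isspace x = false := by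
      intro x hx
      have hnd : pvDelim x = false := by
        rcases List.mem_cons.mp hx with h | h
        · subst h; simpa using hd
        · simpa using List.mem_takeWhile_imp h
      simp [pvDelim] at hnd; exact hnd.1
    rw [pvLoopC]
    simp only [List.reverse_singleton, List.singleton_append, pv_strip_id htok]
    have hsw' : PySem.Chars.startswith (c :: rest.takeWhile (fun d => !pvDelim d))
        ['c','o','m','p',':'] = true := hsw
    rw [if_pos hsw', if_pos hsw']
  | case4 c rest hd token hsw ih =>
    rw [pvScan, if_neg hd]
    rw [pvTok, if_neg hd, pv_tok_split rest [c] (by simp)]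
    have htok : ∀ x ∈ c :: rest.takeWhile (fun d => !pvDelim d), PySem.Chars.isspace x = false := by
      intro x hx
      have hnd : pvDelim x = false := by
        rcases List.mem_cons.mp hx with h | h
        · subst h; simpa using hd
        · simpa using List.mem_takeWhile_imp h
      simp [pvDelim] at hnd; exact hnd.1
    rw [pvLoopC]
    simp only [List.reverse_singleton, List.singleton_append, pv_strip_id htok]
    have hsw' : ¬ PySem.Chars.startswith (c :: rest.takeWhile (fun d => !pvDelim d))
        ['c','o','m','p',':'] = true := hsw
    rw [if_neg hsw', if_neg hsw', ih]

-- ===== VERDICT (by name: the statement is the Claim_ definition above) =====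
theorem extract_component_token_py_spec : Claim_equal_extract_component_token_py := by
  intro query _
  unfold Spec_extract_component_token_py extract_component_token_py extract_component_token_py_alt
  by_cases hq : query = ""
  · subst hq; simp [pvScan]
  · rw [if_neg hq]
    have h1 : (PySem.Str.replace query "," " ").toList = query.toList.map pvRepl := by
      rw [PySem.Str.toList_replace]
      have : (",").toList = [','] := by decide
      have h2 : (" ").toList = [' '] := by decide
      rw [this, h2, pv_replace_map]
    rw [PySem.Str.split₀]
    show pvALoop (List.map String.ofList (PySem.Chars.split₀ (PySem.Str.replace query "," " ").toList)) = _
    rw [h1, pv_split₀_map, pv_aloop_eq, pv_main]
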